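-- pv_equiv track=rewrite | github.com/Eduardo1100/cogAgent_tracker | src/agent/v2/world_model.py | _extract_ui_target_from_action
-- ===== SOURCE A (Python) =====
-- def _extract_ui_target_from_action(action_text: str | None) -> str | None:
--     if not action_text:
--         return None
--     normalized = action_text.strip().lower()
--     for prefix in (
--         "click ",
--         "tap ",
--         "press ",
--         "select ",
--         "choose ",
--         "type ",
--         "fill ",
--         "enter ",
--         "focus ",
--     ):
--         if normalized.startswith(prefix):
--             target = normalized.removeprefix(prefix).strip()
--             return target or None
--     return None
-- ===== SOURCE B (Python) =====
-- _ACTION_VERBS = frozenset(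
--     {"click", "tap", "press", "select", "choose", "type", "fill", "enter", "focus"}
-- )
--
--
-- def _extract_ui_target_from_action(action_text: str | None) -> str | None:
--     if not action_text:
--         return None
--     normalized = action_text.strip().lower()
--     parts = normalized.split(" ", 1)
--     if len(parts) == 2 and parts[0] in _ACTION_VERBS:
--         return parts[1].strip() or None
--     return None
-- ===== Notes on version B (the rewrite author's own statement) =====
-- stated objective: idiomatic
-- what changed: Replaces the nine-way startswith/removeprefix prefix scan with a single space-separated split (maxsplit 1) plus a frozenset membership test on the leading verb.
import Mathlib
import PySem

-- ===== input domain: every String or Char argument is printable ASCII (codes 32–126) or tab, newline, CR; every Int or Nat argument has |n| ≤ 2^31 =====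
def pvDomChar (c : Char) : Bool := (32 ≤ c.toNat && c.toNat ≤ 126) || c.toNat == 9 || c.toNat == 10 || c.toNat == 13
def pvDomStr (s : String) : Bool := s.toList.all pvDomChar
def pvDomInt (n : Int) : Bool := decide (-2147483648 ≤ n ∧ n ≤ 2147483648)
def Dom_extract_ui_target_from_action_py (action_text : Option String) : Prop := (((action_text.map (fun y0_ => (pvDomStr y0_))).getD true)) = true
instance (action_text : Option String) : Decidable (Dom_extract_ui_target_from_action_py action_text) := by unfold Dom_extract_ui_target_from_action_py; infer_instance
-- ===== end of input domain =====

set_option maxRecDepth 4000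


-- B replaces A's nine-way startswith/removeprefix prefix scan with a single split(" ", 1)
-- tokenization plus a set membership test on the leading verb (idiomatic; same behaviour).

-- ===== PORT A =====
-- the literal tuple of prefixes A iterates over
def pvPrefixesA : List (List Char) :=
  ["click ".toList, "tap ".toList, "press ".toList, "select ".toList, "choose ".toList,
   "type ".toList, "fill ".toList, "enter ".toList, "focus ".toList]

-- the for-loop of A: try each prefix in order; on a match, removeprefix + strip, 'or None'.
-- removeprefix is ported by hand (PySem has no primitive): the prefix was just checked with
-- startswith, so it drops exactly p.length chars — exact for that case.
def pvLoopA (n : List Char) : List (List Char) → Option (List Char)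
  | [] => none
  | p :: ps =>
    if PySem.Chars.startswith n p then
      let target := PySem.Chars.strip (n.drop p.length)
      if target = [] then none else some target
    else pvLoopA n ps

def extract_ui_target_from_action_py (action_text : Option String) : Option String :=
  match action_text with
  | none => none
  | some s =>
    if s = "" then none   -- 'if not action_text' is also true for the empty string
    else
      let normalized := PySem.Chars.lower (PySem.Chars.strip s.toList)
      (pvLoopA normalized pvPrefixesA).map String.ofList

-- ===== PORT B =====
def pvVerbsB : List (List Char) :=
  ["click".toList, "tap".toList, "press".toList, "select".toList, "choose".toList,
   "type".toList, "fill".toList, "enter".toList, "focus".toList]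

def extract_ui_target_from_action_py_alt (action_text : Option String) : Option String :=
  match action_text with
  | none => none
  | some s =>
    if s = "" then none
    else
      let normalized := PySem.Chars.lower (PySem.Chars.strip s.toList)
      match PySem.Chars.splitMax? normalized [' '] 1 with
      | some [verb, rest] =>          -- len(parts) == 2
        if pvVerbsB.contains verb then
          let t := PySem.Chars.strip rest
          (if t = [] then none else some (String.ofList t))
        else none
      | _ => none                     -- len(parts) == 1 (sep ≠ "", so splitMax? is always some)

-- ===== PRECONDITION & SPEC =====
def Spec_extract_ui_target_from_action_py (action_text : Option String) (out : Option String) : Prop := out = extract_ui_target_from_action_py_alt action_text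
instance (action_text : Option String) (out : Option String) : Decidable (Spec_extract_ui_target_from_action_py action_text out) := by unfold Spec_extract_ui_target_from_action_py; infer_instance

-- ===== CLAIM (what is proved, stated in full; the proofs are below) =====
def Claim_equal_extract_ui_target_from_action_py : Prop := ∀ (action_text : Option String), Dom_extract_ui_target_from_action_py action_text → Spec_extract_ui_target_from_action_py action_text (extract_ui_target_from_action_py action_text)

-- ===== LEMMAS AND PROOFS =====

-- splitOnMax.go with 0 splits left returns the rest as one last piece
theorem pv_go_zero (sep : List Char) (fuel : Nat) (l cur : List Char) (acc : List (List Char)) :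
    PySem.Chars.splitOnMax.go sep fuel 0 l cur acc = ((cur.reverse ++ l) :: acc).reverse := by
  cases fuel with
  | zero => simp [PySem.Chars.splitOnMax.go]
  | succ f => cases l <;> simp [PySem.Chars.splitOnMax.go]

-- splitOnMax.go with one split left on sep [' ']: split at the first space, if any
theorem pv_go_one (fuel : Nat) (l cur : List Char) (h : l.length ≤ fuel) :
    PySem.Chars.splitOnMax.go [' '] fuel 1 l cur [] =
      if ' ' ∈ l then
        [cur.reverse ++ l.takeWhile (· ≠ ' '), (l.dropWhile (· ≠ ' ')).tail]
      else [cur.reverse ++ l] := by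
  induction fuel generalizing l cur with
  | zero =>
    have : l = [] := List.eq_nil_of_length_eq_zero (Nat.le_zero.mp h)
    subst this; simp [PySem.Chars.splitOnMax.go]
  | succ f ih =>
    cases l with
    | nil => simp [PySem.Chars.splitOnMax.go]
    | cons c rest =>
      by_cases hc : c = ' '
      · subst hc
        simp [PySem.Chars.splitOnMax.go, List.isPrefixOf, pv_go_zero,
              List.takeWhile, List.dropWhile]
      · have hpre : List.isPrefixOf [' '] (c :: rest) = false := by
          simp [List.isPrefixOf]; exact fun h' => hc h'.symm
        have hlen : rest.length ≤ f := Nat.le_of_succ_le_succ (by simpa using h)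
        simp only [PySem.Chars.splitOnMax.go, hpre]
        rw [if_neg (by simp)]
        rw [ih rest (c :: cur) hlen]
        simp [List.takeWhile, List.dropWhile, hc, Ne.symm hc]

-- the characterization of normalized.split(" ", 1)
theorem pv_splitMax_char (n : List Char) :
    PySem.Chars.splitMax? n [' '] 1 =
      some (if ' ' ∈ n then [n.takeWhile (· ≠ ' '), (n.dropWhile (· ≠ ' ')).tail] else [n]) := by
  simp only [PySem.Chars.splitMax?, PySem.Chars.splitOnMax]
  norm_num
  rw [pv_go_one (n.length + 1) n [] (Nat.le_succ _)]
  split <;> simp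

theorem pv_takeWhile_of_decomp (v t : List Char) (hv : ∀ c ∈ v, c ≠ ' ') :
    (v ++ ' ' :: t).takeWhile (· ≠ ' ') = v := by
  induction v with
  | nil => simp
  | cons c cs ih =>
    have hc : c ≠ ' ' := hv c (by simp)
    rw [List.cons_append, List.takeWhile_cons, if_pos (by simpa using hc),
        ih (fun d hd => hv d (by simp [hd]))]

theorem pv_dropWhile_of_decomp (v t : List Char) (hv : ∀ c ∈ v, c ≠ ' ') :
    (v ++ ' ' :: t).dropWhile (· ≠ ' ') = ' ' :: t := by
  induction v with
  | nil => simp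
  | cons c cs ih =>
    have hc : c ≠ ' ' := hv c (by simp)
    rw [List.cons_append, List.dropWhile_cons_of_pos (by simpa using hc),
        ih (fun d hd => hv d (by simp [hd]))]

-- startswith (v ++ " ") characterized by the first-space split
theorem pv_startswith_iff (n v : List Char) (hv : ∀ c ∈ v, c ≠ ' ') :
    PySem.Chars.startswith n (v ++ [' ']) = true ↔
      (' ' ∈ n ∧ n.takeWhile (· ≠ ' ') = v) := by
  rw [PySem.Chars.startswith_iff]
  constructor
  · rintro ⟨t, rfl⟩
    rw [List.append_assoc]
    simp only [List.singleton_append]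
    exact ⟨by simp, pv_takeWhile_of_decomp v t hv⟩
  · rintro ⟨hsp, htw⟩
    have hd : n.dropWhile (· ≠ ' ') ≠ [] := by
      intro h0
      have := List.takeWhile_append_dropWhile (p := (· ≠ ' ')) (l := n)
      rw [h0, List.append_nil] at this
      rw [← this] at hsp
      have := List.mem_takeWhile_imp hsp
      simp at this
    have hc0 := List.head_dropWhile_not (p := (· ≠ ' ')) (l := n) hd
    obtain ⟨c, t, hct⟩ := List.exists_cons_of_ne_nil hd
    have hc : c = ' ' := by
      have : ¬ ((n.dropWhile (· ≠ ' ')).head hd ≠ ' ') := by simpa using hc0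
      simp only [hct, List.head_cons] at this
      simpa using this
    refine ⟨t, ?_⟩
    have hn : n = v ++ ' ' :: t := by
      conv_lhs => rw [← List.takeWhile_append_dropWhile (p := (· ≠ ' ')) (l := n)]
      rw [htw, hct, hc]
    rw [hn, List.append_assoc]; simp
theorem pv_loopA_eq (n : List Char) (vs : List (List Char)) (hvs : ∀ v ∈ vs, ∀ c ∈ v, c ≠ ' ') :
    pvLoopA n (vs.map (· ++ [' '])) =
      if ' ' ∈ n ∧ n.takeWhile (· ≠ ' ') ∈ vs then
        (let t := PySem.Chars.strip ((n.dropWhile (· ≠ ' ')).tail);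
         if t = [] then none else some t)
      else none := by
  induction vs with
  | nil => simp [pvLoopA]
  | cons v rest ih =>
    simp only [List.map_cons, pvLoopA]
    by_cases hsw : PySem.Chars.startswith n (v ++ [' ']) = true
    · have hvsp : ∀ c ∈ v, c ≠ ' ' := hvs v (by simp)
      obtain ⟨hsp, htw⟩ := (pv_startswith_iff n v hvsp).mp hsw
      -- in the matched branch n = v ++ ' ' :: t, so drop (|v|+1) n = tail (dropWhile n)
      obtain ⟨t, hn⟩ := (PySem.Chars.startswith_iff n (v ++ [' '])).mp hsw
      have hn' : n = v ++ ' ' :: t := by rw [← hn, List.append_assoc]; rfl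
      have hdw : (n.dropWhile (· ≠ ' ')).tail = t := by
        rw [hn', pv_dropWhile_of_decomp v t hvsp]; rfl
      have hdrop : n.drop (v ++ [' ']).length = t := by rw [hn']; simp
      have hcond : ' ' ∈ n ∧ n.takeWhile (· ≠ ' ') ∈ v :: rest := by
        exact ⟨hsp, by rw [htw]; simp⟩
      rw [if_pos hsw, if_pos hcond]
      simp only [hdrop, hdw]
    · rw [if_neg hsw, ih (fun w hw => hvs w (by simp [hw]))]
      have hne : ¬ (' ' ∈ n ∧ n.takeWhile (· ≠ ' ') = v) :=
        fun h => hsw ((pv_startswith_iff n v (hvs v (by simp))).mpr h)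
      by_cases hsp : ' ' ∈ n
      · by_cases hv : n.takeWhile (· ≠ ' ') = v
        · exact absurd ⟨hsp, hv⟩ hne
        · by_cases hm : n.takeWhile (· ≠ ' ') ∈ rest <;>
            · simp only [decide_not] at hv hm ⊢
              simp [hsp, hv, hm]
      · simp [hsp]

-- ===== VERDICT (by name: the statement is the Claim_ definition above) =====
theorem extract_ui_target_from_action_py_spec : Claim_equal_extract_ui_target_from_action_py := by
  intro action_text _
  unfold Spec_extract_ui_target_from_action_py
  unfold extract_ui_target_from_action_py extract_ui_target_from_action_py_alt
  cases action_text with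
  | none => rfl
  | some s =>
    by_cases hs : s = ""
    · simp [hs]
    · simp only [hs, if_false]
      set n := PySem.Chars.lower (PySem.Chars.strip s.toList) with hn
      have hpf : pvPrefixesA = pvVerbsB.map (· ++ [' ']) := by rfl
      have hvs : ∀ v ∈ pvVerbsB, ∀ c ∈ v, c ≠ ' ' := by
        have hb : pvVerbsB.all (fun v => v.all (fun c => c ≠ ' ')) = true := by rfl
        intro v hv c hc
        have h2 := List.all_eq_true.mp (List.all_eq_true.mp hb v hv) c hc
        simpa using h2
      rw [hpf, pv_loopA_eq n pvVerbsB hvs, pv_splitMax_char n]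
      by_cases hsp : ' ' ∈ n
      · simp only [hsp, if_true, true_and]
        by_cases hmem : n.takeWhile (· ≠ ' ') ∈ pvVerbsB
        · have : pvVerbsB.contains (n.takeWhile (· ≠ ' ')) = true := by
            simpa [List.contains_iff_mem] using hmem
          simp only [if_pos hmem, this, if_true]
          split <;> simp_all
        · simp only [decide_not] at hmem ⊢
          simp [hmem]
      · simp [hsp]
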